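-- pv_equiv track=rewrite | github.com/virat-dagar/PatternPrinter | backend/patterns.py | _x_pattern
-- ===== SOURCE A (Python) =====
-- def _x_pattern(symbol: str, size: int) -> list[str]:
--     width = size * 2 - 1
--     rows = []
--     for row in range(width):
--         line = []
--         for col in range(width):
--             line.append(symbol if col in (row, width - row - 1) else " ")
--         rows.append("".join(line))
--     return rows
-- ===== SOURCE B (Python) =====
-- def _x_pattern(symbol: str, size: int) -> list[str]:
--     # Build only the top half (rows 0..size-1) by direct string arithmetic,
--     # then mirror it: the X pattern is vertically symmetric.
--     width = size * 2 - 1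
--     top = []
--     for row in range(size):
--         right = width - row - 1
--         if row == right:
--             top.append(" " * row + symbol + " " * row)
--         else:
--             top.append(" " * row + symbol + " " * (right - row - 1) + symbol + " " * row)
--     return top + list(reversed(top[:-1]))
-- ===== Notes on version B (the rewrite author's own statement) =====
-- stated objective: alternative
-- what changed: Instead of scanning every (row, col) cell with a membership test, B computes only the top half's rows directly by string arithmetic (leading spaces + symbol + inner spaces + symbol + trailing spaces) and obtains the bottom half by mirroring the top, so neither the inner column loop nor the bottom rows are ever computed.
import Mathlib
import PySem

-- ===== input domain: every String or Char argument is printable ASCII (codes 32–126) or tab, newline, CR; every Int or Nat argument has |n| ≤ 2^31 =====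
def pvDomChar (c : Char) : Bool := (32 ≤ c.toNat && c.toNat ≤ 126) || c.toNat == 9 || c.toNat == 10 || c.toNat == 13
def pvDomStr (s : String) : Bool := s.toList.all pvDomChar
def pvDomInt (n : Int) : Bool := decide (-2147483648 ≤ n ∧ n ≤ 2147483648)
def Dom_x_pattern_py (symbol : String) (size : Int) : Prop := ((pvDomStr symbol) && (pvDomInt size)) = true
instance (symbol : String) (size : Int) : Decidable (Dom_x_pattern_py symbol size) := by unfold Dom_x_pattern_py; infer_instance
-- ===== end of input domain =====

-- B builds only the top half of the X by string arithmetic (no per-cell loop) and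
-- mirrors it for the bottom half (objective: alternative decomposition).

-- ===== PORT A =====
-- Port of A: for each row in range(width), build the line column by column with the
-- membership test 'col in (row, width - row - 1)', then join.
def x_pattern_py (symbol : String) (size : Int) : List String :=
  let width := size * 2 - 1
  (PySem.List.pyRange 0 width 1).map (fun row =>
    String.join ((PySem.List.pyRange 0 width 1).map (fun col =>
      if col = row ∨ col = width - row - 1 then symbol else " ")))

-- ===== PORT B =====
-- ' ' * n, hand-ported exactly: n.toNat spaces (a non-positive n gives "", as in Python).
def pySpaces (n : Int) : String := String.ofList (List.replicate n.toNat ' ')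

-- Port of B: rows 0..size-1 by direct concatenation, then 'top + list(reversed(top[:-1]))'
-- (the slice [:-1] via PySem.List.slice, reversed via List.reverse).
def x_pattern_py_alt (symbol : String) (size : Int) : List String :=
  let width := size * 2 - 1
  let top := (PySem.List.pyRange 0 size 1).map (fun row =>
    let right := width - row - 1
    if row = right then pySpaces row ++ symbol ++ pySpaces row
    else pySpaces row ++ symbol ++ pySpaces (right - row - 1) ++ symbol ++ pySpaces row)
  top ++ (PySem.List.slice top none (some (-1))).reverse

-- ===== PRECONDITION & SPEC =====
def Spec_x_pattern_py (symbol : String) (size : Int) (out : List String) : Prop := out = x_pattern_py_alt symbol size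
instance (symbol : String) (size : Int) (out : List String) : Decidable (Spec_x_pattern_py symbol size out) := by unfold Spec_x_pattern_py; infer_instance

-- ===== CLAIM (what is proved, stated in full; the proofs are below) =====
def Claim_equal_x_pattern_py : Prop := ∀ (symbol : String) (size : Int), Dom_x_pattern_py symbol size → Spec_x_pattern_py symbol size (x_pattern_py symbol size)

-- ===== LEMMAS AND PROOFS =====

-- A run of columns on which the entry is " " contributes a run of spaces.
theorem pv_seg_sp (f : Int → String) (a b : Int)
    (h : ∀ c ∈ PySem.List.pyRange a b 1, f c = " ") :
    (((PySem.List.pyRange a b 1).map f).map String.toList).flatten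
      = List.replicate (b - a).toNat ' ' := by
  rw [List.map_congr_left h]
  rw [List.map_const', PySem.List.length_pyRange_one, List.map_replicate]
  show (List.replicate (b - a).toNat ([' '] : List Char)).flatten = _
  induction (b - a).toNat with
  | zero => simp
  | succ k ih => simp [List.replicate_succ, ih]

-- A's row 'width - r - 1' literally equals A's row 'r' (the membership pair is swapped).
theorem pv_aRow_symm (symbol : String) (w r : Int) :
    String.join ((PySem.List.pyRange 0 w 1).map (fun col =>
      if col = (w - r - 1) ∨ col = w - (w - r - 1) - 1 then symbol else " "))
    = String.join ((PySem.List.pyRange 0 w 1).map (fun col =>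
      if col = r ∨ col = w - r - 1 then symbol else " ")) := by
  apply congrArg String.join
  apply List.map_congr_left
  intro col _
  have hw : w - (w - r - 1) - 1 = r := by omega
  rw [hw]
  by_cases h1 : col = r <;> by_cases h2 : col = w - r - 1 <;> simp [h1, h2]

-- A's per-column row, for a row in the top half, equals B's concatenation.
theorem pv_aRow_top (symbol : String) (w r : Int) (h0 : 0 ≤ r) (h2 : r ≤ w - r - 1) :
    String.join ((PySem.List.pyRange 0 w 1).map (fun col =>
      if col = r ∨ col = w - r - 1 then symbol else " "))
    = if r = w - r - 1 then pySpaces r ++ symbol ++ pySpaces r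
      else pySpaces r ++ symbol ++ pySpaces ((w - r - 1) - r - 1) ++ symbol ++ pySpaces r := by
  apply String.toList_inj.mp
  rw [String.toList_join]
  by_cases hm : r = w - r - 1
  · -- middle row: one symbol at column r = w - r - 1
    rw [if_pos hm]
    have ha := PySem.List.pyRange_one_append 0 r w h0 (show r ≤ w by omega)
    have hb := PySem.List.pyRange_one_cons (show r < w by omega)
    rw [ha, hb]
    simp only [List.map_append, List.map_cons, List.flatten_append, List.flatten_cons]
    rw [pv_seg_sp _ 0 r (by
      intro c hc; rw [PySem.List.mem_pyRange_one] at hc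
      rw [if_neg (by omega)])]
    rw [pv_seg_sp _ (r + 1) w (by
      intro c hc; rw [PySem.List.mem_pyRange_one] at hc
      rw [if_neg (by omega)])]
    simp only [true_or, if_true]
    simp only [String.toList_append, pySpaces, String.toList_ofList]
    have e1 : (w - (r + 1)).toNat = r.toNat := by omega
    rw [e1]
    simp
  · -- r < w - r - 1: two symbols
    have hlt : r < w - r - 1 := lt_of_le_of_ne h2 hm
    rw [if_neg hm]
    have ha := PySem.List.pyRange_one_append 0 r w h0 (show r ≤ w by omega)
    have hb := PySem.List.pyRange_one_cons (show r < w by omega)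
    have hc := PySem.List.pyRange_one_append (r + 1) (w - r - 1) w
      (show r + 1 ≤ w - r - 1 by omega) (show w - r - 1 ≤ w by omega)
    have hd := PySem.List.pyRange_one_cons (show w - r - 1 < w by omega)
    have he : w - r - 1 + 1 = w - r := by omega
    rw [ha, hb, hc, hd, he]
    simp only [List.map_append, List.map_cons, List.flatten_append, List.flatten_cons]
    rw [pv_seg_sp _ 0 r (by
      intro c hc'; rw [PySem.List.mem_pyRange_one] at hc'
      rw [if_neg (by omega)])]
    rw [pv_seg_sp _ (r + 1) (w - r - 1) (by
      intro c hc'; rw [PySem.List.mem_pyRange_one] at hc'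
      rw [if_neg (by omega)])]
    rw [pv_seg_sp _ (w - r) w (by
      intro c hc'; rw [PySem.List.mem_pyRange_one] at hc'
      rw [if_neg (by omega)])]
    simp only [true_or, if_true]
    simp only [String.toList_append, pySpaces, String.toList_ofList]
    have e1 : (w - r - 1 - (r + 1)).toNat = (w - r - 1 - r - 1).toNat := by omega
    have e2 : (w - (w - r)).toNat = r.toNat := by omega
    rw [e1, e2]
    simp

-- The whole equality for a positive size: top half by pv_aRow_top, bottom half by
-- the symmetry pv_aRow_symm.
theorem pv_main (symbol : String) (size : Int) (hs : 0 < size) :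
    (PySem.List.pyRange 0 (size * 2 - 1) 1).map (fun row =>
      String.join ((PySem.List.pyRange 0 (size * 2 - 1) 1).map (fun col =>
        if col = row ∨ col = size * 2 - 1 - row - 1 then symbol else " ")))
    = ((PySem.List.pyRange 0 size 1).map (fun row =>
        if row = size * 2 - 1 - row - 1 then pySpaces row ++ symbol ++ pySpaces row
        else pySpaces row ++ symbol ++ pySpaces (size * 2 - 1 - row - 1 - row - 1) ++ symbol ++ pySpaces row))
      ++ ((PySem.List.pyRange 0 size 1).map (fun row =>
        if row = size * 2 - 1 - row - 1 then pySpaces row ++ symbol ++ pySpaces row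
        else pySpaces row ++ symbol ++ pySpaces (size * 2 - 1 - row - 1 - row - 1) ++ symbol ++ pySpaces row)).dropLast.reverse := by
  apply List.ext_getElem
  · simp only [List.length_map, PySem.List.length_pyRange_one, List.length_append,
      List.length_reverse, List.length_dropLast]
    omega
  · intro i h1 h2
    simp only [List.length_map, PySem.List.length_pyRange_one] at h1
    rw [List.getElem_map]
    by_cases hi : i < ((PySem.List.pyRange 0 size 1).map (fun row =>
        if row = size * 2 - 1 - row - 1 then pySpaces row ++ symbol ++ pySpaces row
        else pySpaces row ++ symbol ++ pySpaces (size * 2 - 1 - row - 1 - row - 1) ++ symbol ++ pySpaces row)).length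
    · rw [List.getElem_append_left hi]
      simp only [List.length_map, PySem.List.length_pyRange_one] at hi
      simp only [List.getElem_map, PySem.List.getElem_pyRange_one]
      exact pv_aRow_top symbol (size * 2 - 1) (0 + (i : Int)) (by omega) (by omega)
    · rw [List.getElem_append_right (le_of_not_gt hi)]
      simp only [List.length_map, PySem.List.length_pyRange_one] at hi
      rw [List.getElem_reverse, List.getElem_dropLast]
      simp only [List.getElem_map, PySem.List.getElem_pyRange_one,
        List.length_dropLast, List.length_map, PySem.List.length_pyRange_one]
      have harg : (0 : Int) + (((size - 0).toNat - 1 - 1 - (i - (size - 0).toNat) : Nat) : Int)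
          = (size * 2 - 1) - ((0 : Int) + (i : Int)) - 1 := by omega
      rw [harg]
      have key := pv_aRow_top symbol (size * 2 - 1)
        ((size * 2 - 1) - ((0 : Int) + (i : Int)) - 1) (by omega) (by omega)
      rw [pv_aRow_symm symbol (size * 2 - 1) ((0 : Int) + (i : Int))] at key
      exact key

-- ===== VERDICT (by name: the statement is the Claim_ definition above) =====
theorem x_pattern_py_spec : Claim_equal_x_pattern_py := by
  intro symbol size _
  unfold Spec_x_pattern_py x_pattern_py x_pattern_py_alt
  dsimp only
  by_cases hs : size ≤ 0
  · rw [PySem.List.pyRange_one_eq_nil (show size * 2 - 1 ≤ 0 by omega),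
        PySem.List.pyRange_one_eq_nil hs]
    simp [PySem.List.slice]
  · have hs' : 0 < size := by omega
    rw [PySem.List.slice_to_neg_one]
    exact pv_main symbol size hs'
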